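-- pv_equiv track=rewrite | github.com/daniel-reich/ubiquitous-fiesta | uWpS5xMjzZFAkiQzL_4.py | odds_vs_evens
-- ===== SOURCE A (Python) =====
-- def odds_vs_evens(num):
--   num = str(num)
--   lis1 =[int(i) for i in num if int(i) % 2 == 0]
--   lis2 =[int(i) for i in num if int(i) % 2 != 0]
--   if sum(lis1) > sum(lis2):
--     return 'even'
--   elif sum(lis1) < sum(lis2):
--     return 'odd'
--   else:
--     return 'equal'
-- ===== SOURCE B (Python) =====
-- def odds_vs_evens(num):
--   total = 0
--   for c in str(num):
--     d = int(c)
--     total += d if d % 2 == 0 else -d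
--   if total > 0:
--     return 'even'
--   elif total < 0:
--     return 'odd'
--   else:
--     return 'equal'
-- ===== Notes on version B (the rewrite author's own statement) =====
-- stated objective: simpler
-- what changed: B keeps one signed running total (+digit if even, -digit if odd) in a single pass and reads its sign, instead of building two filtered digit lists and summing each; Pre_ excludes negative num, where both programs raise ValueError on int('-').
import Mathlib
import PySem

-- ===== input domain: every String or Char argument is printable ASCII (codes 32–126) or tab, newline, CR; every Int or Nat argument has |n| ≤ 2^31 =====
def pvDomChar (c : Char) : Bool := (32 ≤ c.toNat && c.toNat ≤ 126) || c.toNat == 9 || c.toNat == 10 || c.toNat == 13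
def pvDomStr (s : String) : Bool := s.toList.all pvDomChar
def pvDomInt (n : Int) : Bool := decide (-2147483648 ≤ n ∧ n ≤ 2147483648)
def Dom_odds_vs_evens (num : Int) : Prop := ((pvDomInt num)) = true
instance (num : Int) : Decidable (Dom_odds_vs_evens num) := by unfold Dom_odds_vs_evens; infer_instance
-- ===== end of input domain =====

-- B keeps one signed running total over the digit characters instead of two filtered lists; return value only.

-- ===== PORT A =====
-- int(i) for a one-character string i; Pre_ guarantees every character of str(num) is a
-- digit (num ≥ 0), where PySem.Int.ofChars? returns some and this is exact.
def pyIntOfChar (c : Char) : Int := (PySem.Int.ofChars? [c]).getD 0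

def odds_vs_evens (num : Int) : String :=
  let s := PySem.Int.toChars num
  let lis1 := (s.filter (fun i => PySem.Int.mod (pyIntOfChar i) 2 == 0)).map pyIntOfChar
  let lis2 := (s.filter (fun i => PySem.Int.mod (pyIntOfChar i) 2 != 0)).map pyIntOfChar
  if lis1.sum > lis2.sum then "even"
  else if lis1.sum < lis2.sum then "odd"
  else "equal"

-- ===== PORT B =====
def odds_vs_evens_alt (num : Int) : String :=
  let total := (PySem.Int.toChars num).foldl
    (fun t c =>
      let d := pyIntOfChar c
      if PySem.Int.mod d 2 == 0 then t + d else t - d) 0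
  if total > 0 then "even"
  else if total < 0 then "odd"
  else "equal"

-- ===== PRECONDITION & SPEC =====
-- Pre_ excludes negative num: there str(num) contains '-', on which int('-') raises ValueError in both A and B.
def Pre_odds_vs_evens (num : Int) : Prop := 0 ≤ num
instance (num : Int) : Decidable (Pre_odds_vs_evens num) := by unfold Pre_odds_vs_evens; infer_instance
def pvWitness_odds_vs_evens : Int := (123)

def Spec_odds_vs_evens (num : Int) (out : String) : Prop := out = odds_vs_evens_alt num
instance (num : Int) (out : String) : Decidable (Spec_odds_vs_evens num out) := by unfold Spec_odds_vs_evens; infer_instance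

-- ===== CLAIM (what is proved, stated in full; the proofs are below) =====
def Claim_equal_odds_vs_evens : Prop := ∀ (num : Int), Dom_odds_vs_evens num → Pre_odds_vs_evens num → Spec_odds_vs_evens num (odds_vs_evens num)

-- ===== LEMMAS AND PROOFS =====

-- B's fold equals the accumulator plus (even-digit sum − odd-digit sum) of A.
theorem fold_eq_sums (l : List Char) (t : Int) :
    l.foldl (fun t c =>
        let d := pyIntOfChar c
        if PySem.Int.mod d 2 == 0 then t + d else t - d) t
      = t + ((l.filter (fun i => PySem.Int.mod (pyIntOfChar i) 2 == 0)).map pyIntOfChar).sum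
          - ((l.filter (fun i => PySem.Int.mod (pyIntOfChar i) 2 != 0)).map pyIntOfChar).sum := by
  induction l generalizing t with
  | nil => simp
  | cons c l ih =>
    cases h : (PySem.Int.mod (pyIntOfChar c) 2 == 0) with
    | true =>
      simp only [List.foldl_cons, List.filter_cons, h, bne, Bool.not_true, ite_true,
        ite_false, Bool.false_eq_true, List.map_cons, List.sum_cons, ih]
      ring
    | false =>
      simp only [List.foldl_cons, List.filter_cons, h, bne, Bool.not_false, ite_true,
        ite_false, Bool.false_eq_true, List.map_cons, List.sum_cons, ih]
      ring

-- ===== VERDICT (by name: the statement is the Claim_ definition above) =====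
theorem odds_vs_evens_spec : Claim_equal_odds_vs_evens := by
  intro num _ _
  unfold Spec_odds_vs_evens odds_vs_evens odds_vs_evens_alt
  dsimp only
  rw [fold_eq_sums]
  set e := ((PySem.Int.toChars num).filter (fun i => PySem.Int.mod (pyIntOfChar i) 2 == 0)).map pyIntOfChar
  set o := ((PySem.Int.toChars num).filter (fun i => PySem.Int.mod (pyIntOfChar i) 2 != 0)).map pyIntOfChar
  split_ifs with h1 h2 h3 h4 h5 h6 h7 h8 <;> first | rfl | omega
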